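-- pv_equiv track=rewrite | github.com/HNYuuu/Leetcode- | 242.py | solution
-- ===== SOURCE A (Python) =====
-- def solution(s, t):
--     if s == "" and t == "":
--         return True
--     s_dict = {}
--     for i in s:
--         if i not in s_dict.keys():
--             s_dict[i] = 1
--         else:
--             s_dict[i] += 1
--     for i in t:
--         if i in s_dict.keys():
--             s_dict[i] -= 1
--         else:
--             return False
--     if min(s_dict.values()) == 0 and max(s_dict.values()) == 0:
--         return True
--     else:
--         return False
-- ===== SOURCE B (Python) =====
-- def solution(s, t):
--     return sorted(s) == sorted(t)
-- ===== Notes on version B (the rewrite author's own statement) =====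
-- stated objective: idiomatic
-- what changed: Replaced the hand-rolled count-dictionary build/decrement with early return and a min/max-of-values check by a single sort-and-compare of the two character lists.
import Mathlib
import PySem

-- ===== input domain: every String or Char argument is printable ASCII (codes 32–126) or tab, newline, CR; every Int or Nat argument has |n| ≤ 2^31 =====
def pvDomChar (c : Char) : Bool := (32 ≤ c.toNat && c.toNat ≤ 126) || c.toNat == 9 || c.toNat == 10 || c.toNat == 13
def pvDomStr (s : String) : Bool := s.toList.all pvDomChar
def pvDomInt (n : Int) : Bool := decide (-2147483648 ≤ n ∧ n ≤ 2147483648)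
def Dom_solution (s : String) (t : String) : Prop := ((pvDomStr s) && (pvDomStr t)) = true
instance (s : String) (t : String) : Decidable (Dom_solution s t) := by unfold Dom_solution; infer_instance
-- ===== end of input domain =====

-- B replaces A's count-dictionary build/decrement and min/max-of-values check by sort-and-compare (idiomatic, not faster).

-- ===== PORT A =====
-- the second Python loop, with its early 'return False' when a char of t is missing
def solutionLoopT (d : PySem.Dict Char Int) : List Char → Option (PySem.Dict Char Int)
  | [] => some d
  | c :: rest => if d.contains c then solutionLoopT (d.modify c 0 (· - 1)) rest else none

def solution (s : String) (t : String) : Bool :=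
  if s = "" ∧ t = "" then true
  else
    let sDict := s.toList.foldl
      (fun d c => if d.contains c = false then d.insert c 1 else d.modify c 0 (· + 1))
      PySem.Dict.empty
    match solutionLoopT sDict t.toList with
    | none => false  -- the 'return False' inside the loop over t
    | some d' =>
        if PySem.List.min? d'.values (fun v => v) = some 0 ∧
           PySem.List.max? d'.values (fun v => v) = some 0 then true else false

-- ===== PORT B =====
def solution_alt (s : String) (t : String) : Bool :=
  decide ((PySem.List.sorted s.toList (fun x => x) false) =
          (PySem.List.sorted t.toList (fun x => x) false))

-- ===== PRECONDITION & SPEC =====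
def Spec_solution (s : String) (t : String) (out : Bool) : Prop := out = solution_alt s t
instance (s : String) (t : String) (out : Bool) : Decidable (Spec_solution s t out) := by unfold Spec_solution; infer_instance

-- ===== CLAIM (what is proved, stated in full; the proofs are below) =====
def Claim_equal_solution : Prop := ∀ (s : String) (t : String), Dom_solution s t → Spec_solution s t (solution s t)

-- ===== LEMMAS AND PROOFS =====

-- the first loop of A is exactly collections.Counter
lemma firstFold_eq_counter (l : List Char) :
    l.foldl (fun d c => if d.contains c = false then d.insert c 1 else d.modify c 0 (· + 1))
      PySem.Dict.empty = PySem.Dict.counter l := by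
  rw [PySem.Dict.counter_eq_foldl]
  apply List.foldl_ext
  intro d c _
  by_cases h : d.contains c
  · simp [h]
  · simp only [Bool.not_eq_true] at h
    simp [h, PySem.Dict.modify, PySem.Dict.insert,
      PySem.Dict.getD_of_not_contains (d := d) (0 : Int) h]

-- the second loop succeeds iff every char of t is a key, and then it is a fold of decrements
lemma loopT_eq (l : List Char) (d : PySem.Dict Char Int) :
    solutionLoopT d l =
      if l.all (fun c => d.contains c) then
        some (l.foldl (fun d c => d.modify c 0 (· - 1)) d)
      else none := by
  induction l generalizing d with
  | nil => simp [solutionLoopT]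
  | cons c rest ih =>
    by_cases hc : d.contains c = true
    · have hkeep : ∀ c', ((d.modify c 0 (· - 1)).contains c') = d.contains c' := by
        intro c'
        rw [PySem.Dict.contains_modify]
        by_cases h : c' = c
        · subst h; simp [hc]
        · simp [h]
      have hall : rest.all (fun c' => (d.modify c 0 (· - 1)).contains c')
          = rest.all (fun c' => d.contains c') := by
        simp only [hkeep]
      simp [solutionLoopT, hc, ih, hall]
    · simp [solutionLoopT, hc]

lemma getD_foldl_modify_sub (l : List Char) (d : PySem.Dict Char Int) (v : Char) :
    (l.foldl (fun d c => d.modify c 0 (· - 1)) d).getD v 0 = d.getD v 0 - l.count v := by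
  induction l generalizing d with
  | nil => simp
  | cons c rest ih =>
    simp only [List.foldl_cons, ih, PySem.Dict.getD_modify, List.count_cons]
    by_cases h : v = c
    · subst h; simp; ring
    · have h' : ¬ (c = v) := fun hh => h hh.symm
      simp [h, h']

lemma keys_foldl_modify_sub (l : List Char) (d : PySem.Dict Char Int)
    (h : ∀ c ∈ l, d.contains c = true) :
    (l.foldl (fun d c => d.modify c 0 (· - 1)) d).keys = d.keys := by
  induction l generalizing d with
  | nil => simp
  | cons c rest ih =>
    have hc : d.contains c = true := h c (by simp)
    have hkeys : (d.modify c 0 (· - 1)).keys = d.keys := by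
      rw [PySem.Dict.keys_modify, PySem.Dict.keys_insert_of_contains _ _ hc]
    have hrest : ∀ c' ∈ rest, (d.modify c 0 (· - 1)).contains c' = true := by
      intro c' hc'
      rw [PySem.Dict.contains_modify]
      by_cases he : c' = c
      · subst he; simp [hc]
      · simpa [he] using h c' (by simp [hc'])
    simp only [List.foldl_cons, ih _ hrest, hkeys]

-- min(xs)==0 and max(xs)==0 says: xs is nonempty and all its elements are 0
lemma minmax_zero_iff (xs : List Int) :
    (PySem.List.min? xs (fun v => v) = some 0 ∧ PySem.List.max? xs (fun v => v) = some 0)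
      ↔ (xs ≠ [] ∧ ∀ v ∈ xs, v = 0) := by
  constructor
  · rintro ⟨hmin, hmax⟩
    refine ⟨fun hnil => by
      subst hnil
      rw [(PySem.List.min?_eq_none_iff _ _).mpr rfl] at hmin
      simp at hmin, ?_⟩
    intro v hv
    have h1 := PySem.List.min?_isMin hmin v hv
    have h2 := PySem.List.max?_isMax hmax v hv
    omega
  · rintro ⟨hne, hz⟩
    have hmin : ∃ m, PySem.List.min? xs (fun v => v) = some m := by
      cases h : PySem.List.min? xs (fun v => v) with
      | none => exact absurd ((PySem.List.min?_eq_none_iff xs _).mp h) hne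
      | some m => exact ⟨m, rfl⟩
    have hmax : ∃ m, PySem.List.max? xs (fun v => v) = some m := by
      cases h : PySem.List.max? xs (fun v => v) with
      | none => exact absurd ((PySem.List.max?_eq_none_iff xs _).mp h) hne
      | some m => exact ⟨m, rfl⟩
    obtain ⟨m1, h1⟩ := hmin
    obtain ⟨m2, h2⟩ := hmax
    rw [h1, h2, hz m1 (PySem.List.min?_mem h1), hz m2 (PySem.List.max?_mem h2)]
    exact ⟨rfl, rfl⟩

lemma solution_true_iff (s t : String) :
    solution s t = true ↔ s.toList.Perm t.toList := by
  unfold solution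
  by_cases hempty : s = "" ∧ t = ""
  · obtain ⟨hs, ht⟩ := hempty
    subst hs; subst ht
    rw [if_pos ⟨rfl, rfl⟩]
    simp
  · rw [if_neg hempty]
    simp only [firstFold_eq_counter, loopT_eq]
    by_cases hall : t.toList.all (fun c => (PySem.Dict.counter s.toList).contains c) = true
    · -- every char of t occurs in s
      have hsub : ∀ c ∈ t.toList, c ∈ s.toList := by
        intro c hc
        have := (List.all_eq_true.mp hall) c hc
        rw [PySem.Dict.contains_counter] at this
        simpa using this
      set d' := t.toList.foldl (fun d c => d.modify c 0 (· - 1)) (PySem.Dict.counter s.toList) with hd'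
      have hkeys : d'.keys = PySem.Set.ofList s.toList := by
        rw [hd', keys_foldl_modify_sub _ _ (by
          intro c hc
          rw [PySem.Dict.contains_counter]
          simpa using hsub c hc), PySem.Dict.keys_counter]
      have hnodup : d'.keys.Nodup := by rw [hkeys]; exact PySem.Set.nodup_ofList _
      have hgetD : ∀ v, d'.getD v 0 = (s.toList.count v : Int) - t.toList.count v := by
        intro v
        rw [hd', getD_foldl_modify_sub, PySem.Dict.getD_counter]
      have hvals : d'.values = d'.keys.map (fun k => d'.getD k 0) :=
        PySem.Dict.values_eq_map_keys d' hnodup 0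
      have hcond : (PySem.List.min? d'.values (fun v => v) = some 0 ∧
          PySem.List.max? d'.values (fun v => v) = some 0) ↔ s.toList.Perm t.toList := by
        rw [minmax_zero_iff, hvals, hkeys]
        constructor
        · rintro ⟨hne, hz⟩
          rw [List.perm_iff_count]
          intro c
          by_cases hcs : c ∈ s.toList
          · have := hz _ (List.mem_map_of_mem ((PySem.Set.mem_ofList _ _).mpr hcs))
            rw [hgetD] at this
            omega
          · have hct : c ∉ t.toList := fun hct => hcs (hsub c hct)
            rw [List.count_eq_zero_of_not_mem hcs, List.count_eq_zero_of_not_mem hct]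
        · intro hperm
          refine ⟨?_, ?_⟩
          · intro hnil
            rw [List.map_eq_nil_iff] at hnil
            have hsnil : s.toList = [] := by
              by_contra hsne
              obtain ⟨c, hc⟩ := List.exists_mem_of_ne_nil _ hsne
              have hmem : c ∈ PySem.Set.ofList s.toList := (PySem.Set.mem_ofList _ _).mpr hc
              rw [hnil] at hmem
              exact absurd hmem (List.not_mem_nil)
            have htnil : t.toList = [] := List.Perm.eq_nil (hsnil ▸ hperm.symm)
            exact hempty ⟨String.toList_eq_nil_iff.mp hsnil, String.toList_eq_nil_iff.mp htnil⟩
          · intro v hv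
            obtain ⟨k, _, rfl⟩ := List.mem_map.mp hv
            rw [hgetD, List.perm_iff_count.mp hperm]
            omega
      rw [if_pos hall]
      show (if (PySem.List.min? d'.values (fun v => v) = some 0 ∧
           PySem.List.max? d'.values (fun v => v) = some 0) then true else false) = true ↔ _
      split_ifs with h
      · simpa using hcond.mp h
      · simpa using fun hperm => h (hcond.mpr hperm)
    · -- some char of t is not in s: A returns False and the lists are not permutations
      rw [if_neg hall]
      simp only [List.all_eq_true, not_forall] at hall
      obtain ⟨c, hc, hnc⟩ := hall
      rw [PySem.Dict.contains_counter] at hnc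
      have hcs : c ∉ s.toList := by
        intro h; exact hnc (by simpa using h)
      constructor
      · intro h; exact absurd h (by simp)
      · intro hperm; exact absurd (hperm.mem_iff.mpr hc) hcs

-- ===== VERDICT (by name: the statement is the Claim_ definition above) =====
theorem solution_spec : Claim_equal_solution := by
  intro s t _
  unfold Spec_solution solution_alt
  have halt : (decide ((PySem.List.sorted s.toList (fun x => x) false) =
      (PySem.List.sorted t.toList (fun x => x) false)) = true) ↔ s.toList.Perm t.toList := by
    rw [decide_eq_true_iff, PySem.List.sorted_id_eq_sorted_id_iff_perm]
  rw [Bool.eq_iff_iff, solution_true_iff, halt]
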